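-- pv_equiv track=rewrite | github.com/Kassouley/dRATEL-ISAdump | utils.py | frag_and_dupli
-- ===== SOURCE A (Python) =====
-- def frag_and_dupli(tab):
--     result_tab = []
--     for list in tab :
--         new_list = []
--         max_row = 1
--         for element in list:
--             rows = element.split("\n")
--             max_row = max(max_row, len(rows))
--             new_list.append(rows)
--         for i in range(len(new_list)):
--             while len(new_list[i]) < max_row:
--                 new_list[i].append(new_list[i][-1])
--         result = []
--         for i in range(max_row):
--             ligne = []
--             for j in range(len(list)):
--                 ligne.append(new_list[j][i])
--             result.append(ligne)
--         for r in result :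
--             result_tab.append(r)
--     return result_tab
-- ===== SOURCE B (Python) =====
-- def frag_and_dupli(tab):
--     # Single online pass per group: build the transposed output rows incrementally,
--     # cell by cell, instead of A's three staged passes (split+max, pad, transpose).
--     out = []
--     for group in tab:
--         lines = [[]]
--         for cell in group:
--             rows = cell.split("\n")
--             while len(lines) < len(rows):
--                 lines.append(list(lines[-1]))
--             for i, line in enumerate(lines):
--                 line.append(rows[i] if i < len(rows) else rows[-1])
--         out.extend(lines)
--     return out
-- ===== Notes on version B (the rewrite author's own statement) =====
-- stated objective: alternative
-- what changed: A splits every cell, then pads each fragment list to the group maximum by repeating its last element, then transposes by double indexing; B never materialises the padded matrix: it maintains the transposed output rows directly in one online pass, duplicating the current last output row when a cell brings more fragments and appending each cell's fragment (last fragment for short cells) to every row.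
import Mathlib
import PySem

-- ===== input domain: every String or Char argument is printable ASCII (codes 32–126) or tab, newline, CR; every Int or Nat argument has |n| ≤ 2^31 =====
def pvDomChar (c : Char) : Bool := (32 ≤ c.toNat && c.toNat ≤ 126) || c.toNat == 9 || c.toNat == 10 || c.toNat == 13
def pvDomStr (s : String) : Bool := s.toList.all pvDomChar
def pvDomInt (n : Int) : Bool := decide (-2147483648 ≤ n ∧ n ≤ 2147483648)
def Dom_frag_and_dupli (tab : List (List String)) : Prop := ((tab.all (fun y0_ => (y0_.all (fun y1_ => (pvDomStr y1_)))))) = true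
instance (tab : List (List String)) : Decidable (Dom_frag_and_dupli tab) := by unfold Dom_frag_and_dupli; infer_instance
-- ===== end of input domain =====

-- B replaces A's three staged passes (split+max, pad-by-last, index transpose) by one online pass that
-- grows the transposed output rows cell by cell; return values proved equal on all inputs.

-- ===== PORT A =====
-- element.split("\n"): split? is some because the separator "\n" is nonempty, so .getD [] is exact
def pvSplitCell (c : String) : List String := (PySem.Str.split? c "\n").getD []

-- the 'while len(new_list[i]) < max_row: new_list[i].append(new_list[i][-1])' loop
def pvPadA (r : List String) (m : Nat) : List String :=
  if r.length < m then pvPadA (r ++ [PySem.List.pyGetD r (-1) ""]) m else r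
termination_by m - r.length
decreasing_by simp [List.length_append]; omega

def frag_and_dupli (tab : List (List String)) : List (List String) :=
  tab.foldl (fun result_tab list =>
    -- first loop: build new_list and max_row together
    let st := list.foldl
      (fun (acc : List (List String) × Nat) element =>
        let rows := pvSplitCell element
        (acc.1 ++ [rows], max acc.2 rows.length)) ([], 1)
    -- second loop: pad each new_list[i] in place (indices are in range: i < len(new_list))
    let padded := (List.range st.1.length).foldl
      (fun nl i => nl.set i (pvPadA (nl.getD i []) st.2)) st.1
    -- transpose loops (new_list[j][i] is in range: j < len(list), i < max_row = len(padded row))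
    let result := (List.range st.2).foldl (fun res i =>
      res ++ [(List.range list.length).foldl
        (fun ligne j => ligne ++ [(padded.getD j []).getD i ""]) []]) []
    result_tab ++ result) []

-- ===== PORT B =====
-- the 'while len(lines) < len(rows): lines.append(list(lines[-1]))' loop (list(...) copies, value-equal)
def pvGrowB (lines : List (List String)) (k : Nat) : List (List String) :=
  if lines.length < k then pvGrowB (lines ++ [PySem.List.pyGetD lines (-1) []]) k else lines
termination_by k - lines.length
decreasing_by simp [List.length_append]; omega

-- rows[i] with 0 ≤ i < len(rows) is exact as getD; rows[-1] is pyGetD (rows is nonempty there in Python)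
def frag_and_dupli_alt (tab : List (List String)) : List (List String) :=
  tab.foldl (fun out group =>
    let lines := group.foldl (fun lines cell =>
      let rows := (PySem.Str.split? cell "\n").getD []
      let lines := pvGrowB lines rows.length
      (PySem.List.enumerate lines 0).map (fun p =>
        p.2 ++ [if p.1 < (rows.length : Int) then PySem.List.pyGetD rows p.1 ""
                else PySem.List.pyGetD rows (-1) ""])) [[]]
    out ++ lines) []

-- ===== PRECONDITION & SPEC =====
def Spec_frag_and_dupli (tab : List (List String)) (out : List (List String)) : Prop := out = frag_and_dupli_alt tab
instance (tab : List (List String)) (out : List (List String)) : Decidable (Spec_frag_and_dupli tab out) := by unfold Spec_frag_and_dupli; infer_instance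

-- ===== CLAIM (what is proved, stated in full; the proofs are below) =====
def Claim_equal_frag_and_dupli : Prop := ∀ (tab : List (List String)), Dom_frag_and_dupli tab → Spec_frag_and_dupli tab (frag_and_dupli tab)

-- ===== LEMMAS AND PROOFS =====

-- the common characterisation: row i of a group is every split cell read at the clamped index
def pvClampRow (cs : List (List String)) (i : Nat) : List String :=
  cs.map (fun r => r.getD (min i (r.length - 1)) "")

def pvM (cs : List (List String)) : Nat := (cs.map List.length).foldl max 1

def pvL (cs : List (List String)) : List (List String) :=
  (List.range (pvM cs)).map (pvClampRow cs)

-- let-free per-group forms of the fold bodies (definitionally equal to the ports' bodies)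
def pvStep (acc : List (List String) × Nat) (e : String) : List (List String) × Nat :=
  (acc.1 ++ [pvSplitCell e], max acc.2 (pvSplitCell e).length)

def pvAgroup (group : List String) : List (List String) :=
  (List.range (group.foldl pvStep ([], 1)).2).foldl
    (fun res i => res ++ [(List.range group.length).foldl
      (fun ligne j => ligne ++
        [(((List.range (group.foldl pvStep ([], 1)).1.length).foldl
            (fun nl i' => nl.set i' (pvPadA (nl.getD i' []) (group.foldl pvStep ([], 1)).2))
            (group.foldl pvStep ([], 1)).1).getD j []).getD i ""]) []]) []

def pvBstep (lines : List (List String)) (rows : List String) : List (List String) :=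
  (PySem.List.enumerate (pvGrowB lines rows.length) 0).map (fun p =>
    p.2 ++ [if p.1 < (rows.length : Int) then PySem.List.pyGetD rows p.1 ""
            else PySem.List.pyGetD rows (-1) ""])

-- ---------- A-side: pvAgroup = pvL ----------

-- A's first loop computes (new_list, max_row) = (map split, running max of lengths)
theorem pvPairFold (l : List String) (a : List (List String)) (m : Nat) :
    l.foldl pvStep (a, m)
    = (a ++ l.map pvSplitCell,
       (l.map (fun e => (pvSplitCell e).length)).foldl max m) := by
  induction l generalizing a m with
  | nil => simp
  | cons x t ih => simp [pvStep, ih]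

-- A's in-place padding loop is a map of g over the list
theorem pvSetFold (g : List String → List String) (k : Nat) (nl : List (List String))
    (hk : k ≤ nl.length) :
    (List.range k).foldl (fun a i => a.set i (g (a.getD i []))) nl
    = (nl.take k).map g ++ nl.drop k := by
  induction k with
  | zero => simp
  | succ k ih =>
    have hk' : k ≤ nl.length := by omega
    have hklt : k < nl.length := by omega
    rw [List.range_succ, List.foldl_append, ih hk']
    have hlen : ((nl.take k).map g).length = k := by
      simp [List.length_take]; omega
    have hgetD : ((nl.take k).map g ++ nl.drop k).getD k [] = nl[k] := by
      rw [List.getD_eq_getElem?_getD, List.getElem?_append_right (by omega)]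
      simp only [hlen, Nat.sub_self, List.getElem?_drop, Nat.add_zero]
      rw [List.getElem?_eq_getElem hklt]
      rfl
    have htake : nl.take (k + 1) = nl.take k ++ [nl[k]] := by
      rw [List.take_add_one, List.getElem?_eq_getElem hklt]
      rfl
    rw [List.foldl_cons, List.foldl_nil, hgetD,
        List.drop_eq_getElem_cons hklt,
        List.set_append_right _ _ (by omega)]
    simp only [hlen, Nat.sub_self, List.set_cons_zero]
    rw [htake, List.map_append, List.append_assoc]
    rfl

theorem pvPadA_eq (r : List String) (m : Nat) :
    pvPadA r m = r ++ List.replicate (m - r.length) (PySem.List.pyGetD r (-1) "") := by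
  by_cases h : r.length < m
  · rw [pvPadA, if_pos h,
        pvPadA_eq (r ++ [PySem.List.pyGetD r (-1) ""]) m,
        PySem.List.pyGetD_neg_one_append_singleton]
    have : m - r.length = (m - (r.length + 1)) + 1 := by omega
    simp [this, List.replicate_succ]
  · rw [pvPadA, if_neg h]
    have : m - r.length = 0 := by omega
    simp [this]
termination_by m - r.length
decreasing_by simp [List.length_append]; omega

-- reading a padded row at i < m is reading the row at the clamped index
theorem pvPadA_getD (r : List String) (m i : Nat) (hi : i < m) :
    (pvPadA r m).getD i "" = r.getD (min i (r.length - 1)) "" := by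
  rw [pvPadA_eq]
  by_cases hlen : i < r.length
  · have hmin : min i (r.length - 1) = i := by omega
    rw [hmin, List.getD_eq_getElem?_getD, List.getElem?_append_left hlen,
        ← List.getD_eq_getElem?_getD]
  · have hmin : min i (r.length - 1) = r.length - 1 := by omega
    rw [hmin, List.getD_eq_getElem?_getD, List.getElem?_append_right (by omega)]
    rcases eq_or_ne r [] with hnil | hne
    · subst hnil
      have hval : PySem.List.pyGetD ([] : List String) (-1) "" = "" := rfl
      simp [hval, (by omega : i < m)]
    · rw [PySem.List.pyGetD_neg_one (h := hne)]
      have hrl : r.length - 1 < r.length := by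
        have := List.length_pos_iff.mpr hne; omega
      have hi' : i - r.length < m - r.length := by omega
      rw [List.getD_eq_getElem?_getD, List.getElem?_eq_getElem hrl]
      simp [hi', List.getLast_eq_getElem]

-- indexing loop over range(len(xs)) is a map
theorem pvMapRangeGetD {α β : Type} (xs : List α) (d : α) (h : α → β) :
    (List.range xs.length).map (fun j => h (xs.getD j d)) = xs.map h := by
  apply List.ext_getElem
  · simp
  · intro j h1 h2
    have hj : j < xs.length := by simpa using h2
    simp only [List.getElem_map, List.getElem_range, List.getD_eq_getElem?_getD,
      List.getElem?_eq_getElem hj, Option.getD_some]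

-- A's per-group output is the clamped-read characterisation
theorem pvAgroup_eq (group : List String) : pvAgroup group = pvL (group.map pvSplitCell) := by
  unfold pvAgroup pvL pvM pvClampRow
  simp only [pvPairFold, List.nil_append]
  simp only [List.map_map]
  rw [List.length_map]
  rw [pvSetFold (fun r => pvPadA r ((group.map fun e => (pvSplitCell e).length).foldl max 1))
        group.length (group.map pvSplitCell) (by simp)]
  rw [(by simp : group.length = (group.map pvSplitCell).length), List.take_length, List.drop_length,
      List.append_nil]
  rw [PySem.List.foldl_append_singleton_eq_map, List.nil_append]
  apply List.map_congr_left
  intro i hi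
  have him : i < (group.map fun e => (pvSplitCell e).length).foldl max 1 := by
    simpa using hi
  rw [PySem.List.foldl_append_singleton_eq_map, List.nil_append]
  rw [(by simp : (List.map pvSplitCell group).length
        = ((List.map pvSplitCell group).map
            (fun r => pvPadA r ((group.map fun e => (pvSplitCell e).length).foldl max 1))).length)]
  rw [pvMapRangeGetD ((List.map pvSplitCell group).map
        (fun r => pvPadA r ((group.map fun e => (pvSplitCell e).length).foldl max 1))) []
        (fun r => r.getD i ""), List.map_map, List.map_map]
  apply List.map_congr_left
  intro c _
  simp only [Function.comp_apply]
  exact pvPadA_getD _ _ i him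

-- ---------- B-side: folding pvBstep from [[]] yields pvL ----------

theorem pvOne_le_M (cs : List (List String)) : 1 ≤ pvM cs := by
  unfold pvM
  exact (PySem.List.le_foldl_max _ _).1

theorem pvLen_le_M (cs : List (List String)) (r : List String) (hr : r ∈ cs) :
    r.length ≤ pvM cs := by
  unfold pvM
  exact (PySem.List.le_foldl_max _ _).2 _ (List.mem_map_of_mem hr)

-- the row-duplication loop turns pvL cs into the clamped rows up to max (pvM cs) k
theorem pvGrowB_eq (L : List (List String)) (k : Nat) :
    pvGrowB L k = L ++ List.replicate (k - L.length) (PySem.List.pyGetD L (-1) []) := by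
  by_cases h : L.length < k
  · rw [pvGrowB, if_pos h,
        pvGrowB_eq (L ++ [PySem.List.pyGetD L (-1) []]) k,
        PySem.List.pyGetD_neg_one_append_singleton]
    have : k - L.length = (k - (L.length + 1)) + 1 := by omega
    simp [this, List.replicate_succ]
  · rw [pvGrowB, if_neg h]
    have : k - L.length = 0 := by omega
    simp [this]
termination_by k - L.length
decreasing_by simp [List.length_append]; omega

-- a clamped row at any index ≥ pvM cs - 1 is the last clamped row
theorem pvClampRow_high (cs : List (List String)) (i : Nat) (hi : pvM cs - 1 ≤ i) :
    pvClampRow cs i = pvClampRow cs (pvM cs - 1) := by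
  unfold pvClampRow
  apply List.map_congr_left
  intro r hr
  have := pvLen_le_M cs r hr
  have : min i (r.length - 1) = min (pvM cs - 1) (r.length - 1) := by omega
  rw [this]

theorem pvGrowB_L (cs : List (List String)) (k : Nat) :
    pvGrowB (pvL cs) k = (List.range (max (pvM cs) k)).map (pvClampRow cs) := by
  have hM := pvOne_le_M cs
  have hlen : (pvL cs).length = pvM cs := by simp [pvL]
  have hne : pvL cs ≠ [] := by
    intro h; rw [← List.length_eq_zero_iff] at h; omega
  have hlast : PySem.List.pyGetD (pvL cs) (-1) [] = pvClampRow cs (pvM cs - 1) := by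
    rw [PySem.List.pyGetD_neg_one (h := hne), List.getLast_eq_getElem]
    simp [pvL]
  rw [pvGrowB_eq, hlen, hlast]
  apply List.ext_getElem
  · simp [pvL]; omega
  · intro i h1 h2
    have hi : i < max (pvM cs) k := by simpa using h2
    by_cases hlow : i < pvM cs
    · rw [List.getElem_append_left (by simp [pvL]; omega)]
      simp [pvL]
    · rw [List.getElem_append_right (by simp [pvL]; omega)]
      rw [List.getElem_replicate, List.getElem_map, List.getElem_range]
      exact (pvClampRow_high cs i (by omega)).symm

-- mapping over the enumeration of a range-map list reads each index once
theorem pvEnumMapRange {α β : Type} (n : Nat) (f : Nat → α) (g : Int × α → β) :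
    (PySem.List.enumerate ((List.range n).map f) 0).map g
    = (List.range n).map (fun (i : Nat) => g ((i : Int), f i)) := by
  apply List.ext_getElem
  · simp [PySem.List.length_enumerate]
  · intro i h1 h2
    have hi : i < n := by simpa using h2
    simp only [List.getElem_map, PySem.List.getElem_enumerate, List.getElem_range, zero_add]

-- one cell extends every clamped row by its own clamped fragment
theorem pvBstep_L (cs : List (List String)) (r : List String) :
    pvBstep (pvL cs) r = pvL (cs ++ [r]) := by
  have hM' : pvM (cs ++ [r]) = max (pvM cs) r.length := by
    simp [pvM, List.foldl_append]
  unfold pvBstep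
  rw [pvGrowB_L, pvEnumMapRange]
  unfold pvL
  rw [hM']
  apply List.map_congr_left
  intro i hi
  have hi' : i < max (pvM cs) r.length := by simpa using hi
  unfold pvClampRow
  rw [List.map_append, List.map_cons, List.map_nil]
  dsimp only
  congr 1
  by_cases hlt : i < r.length
  · rw [if_pos (by exact_mod_cast hlt)]
    rw [PySem.List.pyGetD_natCast]
    have : min i (r.length - 1) = i := by omega
    rw [this]
  · rw [if_neg (by exact_mod_cast hlt)]
    rcases eq_or_ne r [] with hnil | hne
    · subst hnil; rfl
    · rw [PySem.List.pyGetD_neg_one (h := hne), List.getLast_eq_getElem]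
      have hrl : r.length - 1 < r.length := by
        have := List.length_pos_iff.mpr hne; omega
      have : min i (r.length - 1) = r.length - 1 := by omega
      rw [this, List.getD_eq_getElem?_getD, List.getElem?_eq_getElem hrl]
      rfl

theorem pvFoldB (l cs : List (List String)) :
    l.foldl pvBstep (pvL cs) = pvL (cs ++ l) := by
  induction l generalizing cs with
  | nil => simp
  | cons x t ih =>
    rw [List.foldl_cons, pvBstep_L, ih]
    simp

theorem pvBgroup_eq (group : List String) :
    (group.map pvSplitCell).foldl pvBstep [[]] = pvL (group.map pvSplitCell) := by
  have h0 : pvL [] = [[]] := rfl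
  rw [← h0, pvFoldB, List.nil_append]

-- ===== VERDICT (by name: the statement is the Claim_ definition above) =====
theorem frag_and_dupli_spec : Claim_equal_frag_and_dupli := by
  intro tab _
  show frag_and_dupli tab = frag_and_dupli_alt tab
  have hA : frag_and_dupli tab = tab.foldl (fun acc g => acc ++ pvAgroup g) [] := rfl
  have hB : frag_and_dupli_alt tab
      = tab.foldl (fun acc g => acc ++ (g.map pvSplitCell).foldl pvBstep [[]]) [] := by
    simp only [frag_and_dupli_alt, List.foldl_map]
    rfl
  rw [hA, hB, PySem.List.foldl_append_eq_flatMap, PySem.List.foldl_append_eq_flatMap]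
  have hfun : pvAgroup = fun g => (g.map pvSplitCell).foldl pvBstep [[]] :=
    funext (fun g => by rw [pvAgroup_eq, pvBgroup_eq])
  rw [hfun]
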